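-- pv_equiv track=rewrite | github.com/tonychang04/portscanner-pro | app.py | get_security_risk
-- ===== SOURCE A (Python) =====
-- def get_security_risk(open_ports):
--     """Calculate overall security risk level"""
--     if not open_ports:
--         return {'level': 'safe', 'label': 'Safe', 'color': '#00ff88'}
--
--     high_risk_ports = [23, 3389, 5900, 21]
--     medium_risk_ports = [22, 135, 139, 445, 1433, 3306, 5432, 6379, 27017]
--
--     port_numbers = [p['port'] for p in open_ports]
--
--     if any(p in high_risk_ports for p in port_numbers):
--         return {'level': 'high', 'label': 'High Risk', 'color': '#ff4757'}
--     elif any(p in medium_risk_ports for p in port_numbers):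
--         return {'level': 'medium', 'label': 'Medium Risk', 'color': '#ffa502'}
--     else:
--         return {'level': 'low', 'label': 'Low Risk', 'color': '#00d9ff'}
-- ===== SOURCE B (Python) =====
-- def get_security_risk(open_ports):
--     """Calculate overall security risk level (single pass)"""
--     if not open_ports:
--         return {'level': 'safe', 'label': 'Safe', 'color': '#00ff88'}
--
--     high_risk = {23, 3389, 5900, 21}
--     medium_risk = {22, 135, 139, 445, 1433, 3306, 5432, 6379, 27017}
--
--     seen_medium = False
--     for p in open_ports:
--         port = p['port']
--         if port in high_risk:
--             return {'level': 'high', 'label': 'High Risk', 'color': '#ff4757'}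
--         if port in medium_risk:
--             seen_medium = True
--
--     if seen_medium:
--         return {'level': 'medium', 'label': 'Medium Risk', 'color': '#ffa502'}
--     return {'level': 'low', 'label': 'Low Risk', 'color': '#00d9ff'}
-- ===== Notes on version B (the rewrite author's own statement) =====
-- stated objective: alternative
-- what changed: Replaces A's materialised port_numbers list plus two separate any() membership scans with one early-exit pass over open_ports that returns 'high' immediately and carries a seen_medium flag, testing membership in sets.
import Mathlib
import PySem

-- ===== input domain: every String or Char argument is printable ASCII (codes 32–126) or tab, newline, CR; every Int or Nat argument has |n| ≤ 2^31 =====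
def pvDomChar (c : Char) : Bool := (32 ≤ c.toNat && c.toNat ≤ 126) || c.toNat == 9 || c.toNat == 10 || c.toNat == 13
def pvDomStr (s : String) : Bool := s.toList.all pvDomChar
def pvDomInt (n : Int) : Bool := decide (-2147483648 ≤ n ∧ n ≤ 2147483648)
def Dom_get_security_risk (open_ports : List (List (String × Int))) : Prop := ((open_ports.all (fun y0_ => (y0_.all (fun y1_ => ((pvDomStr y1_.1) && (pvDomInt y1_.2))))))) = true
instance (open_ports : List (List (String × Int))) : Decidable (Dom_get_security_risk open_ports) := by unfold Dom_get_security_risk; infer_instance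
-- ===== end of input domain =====

-- B is a single early-exit pass with a seen_medium flag instead of A's materialised
-- port list and two any() scans; return-value equivalence on inputs where every dict
-- has a 'port' key (Pre_ excludes the KeyError inputs).

-- ===== PORT A =====
-- p['port'] : Pre_ guarantees the key is present; the .getD 0 default is never reached
-- on admitted inputs (Python raises KeyError there, excluded by Pre_).
def get_security_risk (open_ports : List (List (String × Int))) : List (String × String) :=
  if open_ports = [] then
    [("level", "safe"), ("label", "Safe"), ("color", "#00ff88")]
  else
    let high_risk_ports : List Int := [23, 3389, 5900, 21]
    let medium_risk_ports : List Int := [22, 135, 139, 445, 1433, 3306, 5432, 6379, 27017]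
    let port_numbers : List Int := open_ports.map (fun p => (p.lookup "port").getD 0)
    if port_numbers.any (fun p => high_risk_ports.contains p) then
      [("level", "high"), ("label", "High Risk"), ("color", "#ff4757")]
    else if port_numbers.any (fun p => medium_risk_ports.contains p) then
      [("level", "medium"), ("label", "Medium Risk"), ("color", "#ffa502")]
    else
      [("level", "low"), ("label", "Low Risk"), ("color", "#00d9ff")]

-- ===== PORT B =====
-- the for-loop of Source B: early return on a high-risk port, seen_medium flag threaded
def gsrLoop (seen_medium : Bool) : List (List (String × Int)) → List (String × String)
  | [] =>
    if seen_medium then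
      [("level", "medium"), ("label", "Medium Risk"), ("color", "#ffa502")]
    else
      [("level", "low"), ("label", "Low Risk"), ("color", "#00d9ff")]
  | p :: rest =>
    let port : Int := (p.lookup "port").getD 0   -- KeyError inputs excluded by Pre_
    if ([23, 3389, 5900, 21] : List Int).contains port then
      [("level", "high"), ("label", "High Risk"), ("color", "#ff4757")]
    else
      gsrLoop (seen_medium || ([22, 135, 139, 445, 1433, 3306, 5432, 6379, 27017] : List Int).contains port) rest

def get_security_risk_alt (open_ports : List (List (String × Int))) : List (String × String) :=
  if open_ports = [] then
    [("level", "safe"), ("label", "Safe"), ("color", "#00ff88")]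
  else
    gsrLoop false open_ports

-- ===== PRECONDITION & SPEC =====
-- Pre_ excludes exactly the inputs where Python A raises KeyError: some entry without a 'port' key.
def Pre_get_security_risk (open_ports : List (List (String × Int))) : Prop :=
  ∀ p ∈ open_ports, (p.map Prod.fst).contains "port" = true
instance (open_ports : List (List (String × Int))) : Decidable (Pre_get_security_risk open_ports) := by
  unfold Pre_get_security_risk; infer_instance
def pvWitness_get_security_risk : (List (List (String × Int))) := [[("port", 22)], [("port", 80)]]
def Spec_get_security_risk (open_ports : List (List (String × Int))) (out : List (String × String)) : Prop := out = get_security_risk_alt open_ports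
instance (open_ports : List (List (String × Int))) (out : List (String × String)) : Decidable (Spec_get_security_risk open_ports out) := by unfold Spec_get_security_risk; infer_instance

-- ===== CLAIM (what is proved, stated in full; the proofs are below) =====
def Claim_equal_get_security_risk : Prop := ∀ (open_ports : List (List (String × Int))), Dom_get_security_risk open_ports → Pre_get_security_risk open_ports → Spec_get_security_risk open_ports (get_security_risk open_ports)

-- ===== LEMMAS AND PROOFS =====

-- characterisation of the single-pass loop by A's two-scan formulation
theorem gsrLoop_eq (seen : Bool) (l : List (List (String × Int))) :
    gsrLoop seen l =
      (if (l.map (fun p => (p.lookup "port").getD 0)).any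
            (fun p => ([23, 3389, 5900, 21] : List Int).contains p) then
        [("level", "high"), ("label", "High Risk"), ("color", "#ff4757")]
      else if seen || (l.map (fun p => (p.lookup "port").getD 0)).any
            (fun p => ([22, 135, 139, 445, 1433, 3306, 5432, 6379, 27017] : List Int).contains p) then
        [("level", "medium"), ("label", "Medium Risk"), ("color", "#ffa502")]
      else
        [("level", "low"), ("label", "Low Risk"), ("color", "#00d9ff")]) := by
  induction l generalizing seen with
  | nil => simp [gsrLoop]
  | cons p rest ih =>
    simp only [gsrLoop, List.map_cons, List.any_cons]
    cases h : ([23, 3389, 5900, 21] : List Int).contains ((p.lookup "port").getD 0) with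
    | true =>
      simp only [Bool.true_or, if_true]
    | false =>
      simp only [Bool.false_eq_true, if_false, Bool.false_or]
      rw [ih]
      simp only [Bool.or_assoc]
      rfl

-- ===== VERDICT (by name: the statement is the Claim_ definition above) =====
theorem get_security_risk_spec : Claim_equal_get_security_risk := by
  intro open_ports _ _
  unfold Spec_get_security_risk get_security_risk get_security_risk_alt
  by_cases hnil : open_ports = []
  · simp [hnil]
  · simp only [hnil, if_false]
    rw [gsrLoop_eq]
    simp
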